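-- pv_equiv track=rewrite | github.com/ErnoMitrovic/chessPython | pieces.py | vertical_Q
-- ===== SOURCE A (Python) =====
-- def vertical_Q(Q_cord, K_cord):
--   row_Q = Q_cord[0]
--   row_K, col_K = K_cord
--   vertical_moves = []
--   for row in range(row_Q - 1, -1, -1):
--     if row == row_K and Q_cord[1] == col_K:
--       break
--     vertical_moves.append([row, Q_cord[1]])
--   for row in range(row_Q + 1, 8):
--     if row == row_K and Q_cord[1] == col_K:
--       break
--     vertical_moves.append([row, Q_cord[1]])
--   return vertical_moves
-- ===== SOURCE B (Python) =====
-- def vertical_Q(Q_cord, K_cord):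
--     row_Q, col = Q_cord[0], Q_cord[1]
--     row_K, col_K = K_cord
--     low, high = 0, 7
--     if col == col_K:
--         if row_K < row_Q:
--             low = max(0, row_K + 1)
--         elif row_K > row_Q:
--             high = min(7, row_K - 1)
--     down = [[row, col] for row in range(row_Q - 1, low - 1, -1)]
--     up = [[row, col] for row in range(row_Q + 1, high + 1)]
--     return down + up
-- ===== Notes on version B (the rewrite author's own statement) =====
-- stated objective: simpler
-- what changed: Replaces the two per-row break-checking scan loops by precomputed inclusive travel bounds (low/high from the king's row when columns match) and two plain range comprehensions concatenated.
import Mathlib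
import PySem

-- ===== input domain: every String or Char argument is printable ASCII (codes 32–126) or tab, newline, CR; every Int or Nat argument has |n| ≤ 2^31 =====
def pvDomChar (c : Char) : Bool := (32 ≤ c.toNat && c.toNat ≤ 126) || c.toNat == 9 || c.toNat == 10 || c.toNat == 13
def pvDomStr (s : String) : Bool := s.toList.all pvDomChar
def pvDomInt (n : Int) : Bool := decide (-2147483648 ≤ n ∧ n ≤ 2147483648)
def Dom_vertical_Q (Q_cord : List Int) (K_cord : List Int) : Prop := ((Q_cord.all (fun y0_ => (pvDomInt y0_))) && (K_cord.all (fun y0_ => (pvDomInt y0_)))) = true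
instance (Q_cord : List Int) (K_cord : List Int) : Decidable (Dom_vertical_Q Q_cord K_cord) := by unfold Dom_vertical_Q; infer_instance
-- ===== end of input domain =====

-- B replaces A's per-row break-checking scans by precomputed inclusive travel bounds and two plain range maps (objective: simpler).


-- ===== PORT A =====
-- A's for-loop with a break: recursion over the remaining rows, stopping when the king square is hit.
def vqA_loop (rows : List Int) (row_K col_K colQ : Int) (acc : List (List Int)) : List (List Int) :=
  match rows with
  | [] => acc
  | r :: rs =>
      if r = row_K ∧ colQ = col_K then acc
      else vqA_loop rs row_K col_K colQ (acc ++ [[r, colQ]])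

-- Pre_vertical_Q guarantees indices 0 and 1 of both lists exist, so the .getD 0 defaults are never used.
def vertical_Q (Q_cord : List Int) (K_cord : List Int) : List (List Int) :=
  let row_Q := (PySem.List.pyGet? Q_cord 0).getD 0
  let row_K := (PySem.List.pyGet? K_cord 0).getD 0
  let col_K := (PySem.List.pyGet? K_cord 1).getD 0
  let colQ  := (PySem.List.pyGet? Q_cord 1).getD 0
  let down := vqA_loop (PySem.List.pyRange (row_Q - 1) (-1) (-1)) row_K col_K colQ []
  vqA_loop (PySem.List.pyRange (row_Q + 1) 8 1) row_K col_K colQ down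

-- ===== PORT B =====
def vertical_Q_alt (Q_cord : List Int) (K_cord : List Int) : List (List Int) :=
  let row_Q := (PySem.List.pyGet? Q_cord 0).getD 0
  let col   := (PySem.List.pyGet? Q_cord 1).getD 0
  let row_K := (PySem.List.pyGet? K_cord 0).getD 0
  let col_K := (PySem.List.pyGet? K_cord 1).getD 0
  let low  := if col = col_K ∧ row_K < row_Q then max 0 (row_K + 1) else 0
  let high := if col = col_K ∧ row_K > row_Q then min 7 (row_K - 1) else 7
  (PySem.List.pyRange (row_Q - 1) (low - 1) (-1)).map (fun r => [r, col])
    ++ (PySem.List.pyRange (row_Q + 1) (high + 1) 1).map (fun r => [r, col])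

-- ===== PRECONDITION & SPEC =====
-- Pre_ excludes exactly the inputs on which the Python A raises: IndexError when Q_cord has
-- fewer than 2 elements, ValueError when K_cord does not unpack into exactly 2 values.
def Pre_vertical_Q (Q_cord : List Int) (K_cord : List Int) : Prop :=
  2 ≤ Q_cord.length ∧ K_cord.length = 2
instance (Q_cord : List Int) (K_cord : List Int) : Decidable (Pre_vertical_Q Q_cord K_cord) := by
  unfold Pre_vertical_Q; infer_instance
def pvWitness_vertical_Q : List Int × List Int := ([3, 2], [5, 2])

def Spec_vertical_Q (Q_cord : List Int) (K_cord : List Int) (out : List (List Int)) : Prop := out = vertical_Q_alt Q_cord K_cord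
instance (Q_cord : List Int) (K_cord : List Int) (out : List (List Int)) : Decidable (Spec_vertical_Q Q_cord K_cord out) := by unfold Spec_vertical_Q; infer_instance

-- ===== CLAIM (what is proved, stated in full; the proofs are below) =====
def Claim_equal_vertical_Q : Prop := ∀ (Q_cord : List Int) (K_cord : List Int), Dom_vertical_Q Q_cord K_cord → Pre_vertical_Q Q_cord K_cord → Spec_vertical_Q Q_cord K_cord (vertical_Q Q_cord K_cord)

-- ===== LEMMAS AND PROOFS =====

-- The upward scan over range(a, b) with a break at the king square equals a plain map over the
-- range truncated at the king's row (when the break can fire).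
theorem vqA_loop_up (row_K col_K colQ : Int) :
    ∀ (n : Nat) (a b : Int), (b - a).toNat ≤ n → ∀ (acc : List (List Int)),
      vqA_loop (PySem.List.pyRange a b 1) row_K col_K colQ acc =
        acc ++ (PySem.List.pyRange a
            (if colQ = col_K ∧ a ≤ row_K ∧ row_K < b then row_K else b) 1).map
          (fun r => [r, colQ]) := by
  intro n
  induction n with
  | zero =>
      intro a b h acc
      have hba : b ≤ a := by omega
      rw [PySem.List.pyRange_one_eq_nil hba]
      have : ¬ (colQ = col_K ∧ a ≤ row_K ∧ row_K < b) := by rintro ⟨_, h1, h2⟩; omega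
      rw [if_neg this, PySem.List.pyRange_one_eq_nil hba]
      simp [vqA_loop]
  | succ n ih =>
      intro a b h acc
      by_cases hab : a < b
      · rw [PySem.List.pyRange_one_cons hab]
        by_cases hbrk : a = row_K ∧ colQ = col_K
        · rw [vqA_loop, if_pos hbrk]
          have : (if colQ = col_K ∧ a ≤ row_K ∧ row_K < b then row_K else b) = a := by
            rw [if_pos ⟨hbrk.2, le_of_eq hbrk.1, hbrk.1 ▸ hab⟩]; omega
          rw [this, PySem.List.pyRange_one_eq_nil (le_refl a)]; simp
        · rw [vqA_loop, if_neg hbrk,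
            ih (a + 1) b (by omega) (acc ++ [[a, colQ]])]
          by_cases hc : colQ = col_K
          · have hne : a ≠ row_K := fun he => hbrk ⟨he, hc⟩
            have hcond : (colQ = col_K ∧ a + 1 ≤ row_K ∧ row_K < b)
                ↔ (colQ = col_K ∧ a ≤ row_K ∧ row_K < b) := by
              constructor <;> rintro ⟨x, y, z⟩ <;> exact ⟨x, by omega, z⟩
            rw [if_congr hcond rfl rfl]
            have hgt : a < (if colQ = col_K ∧ a ≤ row_K ∧ row_K < b then row_K else b) := by
              split_ifs with hh
              · rcases hh with ⟨_, h1, _⟩; omega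
              · exact hab
            rw [PySem.List.pyRange_one_cons hgt]; simp
          · have h1 : ¬ (colQ = col_K ∧ a + 1 ≤ row_K ∧ row_K < b) := fun hh => hc hh.1
            have h2 : ¬ (colQ = col_K ∧ a ≤ row_K ∧ row_K < b) := fun hh => hc hh.1
            rw [if_neg h1, if_neg h2, PySem.List.pyRange_one_cons hab]; simp
      · have hba : b ≤ a := by omega
        rw [PySem.List.pyRange_one_eq_nil hba]
        have : ¬ (colQ = col_K ∧ a ≤ row_K ∧ row_K < b) := by rintro ⟨_, h1, h2⟩; omega
        rw [if_neg this, PySem.List.pyRange_one_eq_nil hba]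
        simp [vqA_loop]

-- The downward scan over range(a, b, -1) with a break at the king square, symmetrically.
theorem vqA_loop_down (row_K col_K colQ : Int) :
    ∀ (n : Nat) (a b : Int), (a - b).toNat ≤ n → ∀ (acc : List (List Int)),
      vqA_loop (PySem.List.pyRange a b (-1)) row_K col_K colQ acc =
        acc ++ (PySem.List.pyRange a
            (if colQ = col_K ∧ b < row_K ∧ row_K ≤ a then row_K else b) (-1)).map
          (fun r => [r, colQ]) := by
  intro n
  induction n with
  | zero =>
      intro a b h acc
      have hab : a ≤ b := by omega
      rw [PySem.List.pyRange_neg_one_eq_nil hab]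
      have : ¬ (colQ = col_K ∧ b < row_K ∧ row_K ≤ a) := by rintro ⟨_, h1, h2⟩; omega
      rw [if_neg this, PySem.List.pyRange_neg_one_eq_nil hab]
      simp [vqA_loop]
  | succ n ih =>
      intro a b h acc
      by_cases hba : b < a
      · rw [PySem.List.pyRange_neg_one_cons hba]
        by_cases hbrk : a = row_K ∧ colQ = col_K
        · rw [vqA_loop, if_pos hbrk]
          have : (if colQ = col_K ∧ b < row_K ∧ row_K ≤ a then row_K else b) = a := by
            rw [if_pos ⟨hbrk.2, hbrk.1 ▸ hba, le_of_eq hbrk.1.symm⟩]; omega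
          rw [this, PySem.List.pyRange_neg_one_eq_nil (le_refl a)]; simp
        · rw [vqA_loop, if_neg hbrk,
            ih (a - 1) b (by omega) (acc ++ [[a, colQ]])]
          by_cases hc : colQ = col_K
          · have hne : a ≠ row_K := fun he => hbrk ⟨he, hc⟩
            have hcond : (colQ = col_K ∧ b < row_K ∧ row_K ≤ a - 1)
                ↔ (colQ = col_K ∧ b < row_K ∧ row_K ≤ a) := by
              constructor <;> rintro ⟨x, y, z⟩ <;> exact ⟨x, y, by omega⟩
            rw [if_congr hcond rfl rfl]
            have hgt : (if colQ = col_K ∧ b < row_K ∧ row_K ≤ a then row_K else b) < a := by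
              split_ifs with hh
              · rcases hh with ⟨_, _, h2⟩; omega
              · exact hba
            rw [PySem.List.pyRange_neg_one_cons hgt]; simp
          · have h1 : ¬ (colQ = col_K ∧ b < row_K ∧ row_K ≤ a - 1) := fun hh => hc hh.1
            have h2 : ¬ (colQ = col_K ∧ b < row_K ∧ row_K ≤ a) := fun hh => hc hh.1
            rw [if_neg h1, if_neg h2, PySem.List.pyRange_neg_one_cons hba]; simp
      · have hab : a ≤ b := by omega
        rw [PySem.List.pyRange_neg_one_eq_nil hab]
        have : ¬ (colQ = col_K ∧ b < row_K ∧ row_K ≤ a) := by rintro ⟨_, h1, h2⟩; omega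
        rw [if_neg this, PySem.List.pyRange_neg_one_eq_nil hab]
        simp [vqA_loop]

-- ===== VERDICT (by name: the statement is the Claim_ definition above) =====
theorem vertical_Q_spec : Claim_equal_vertical_Q := by
  intro Q_cord K_cord _hDom _hPre
  unfold Spec_vertical_Q
  dsimp only [vertical_Q, vertical_Q_alt]
  set row_Q := (PySem.List.pyGet? Q_cord 0).getD 0 with hrQ
  set row_K := (PySem.List.pyGet? K_cord 0).getD 0 with hrK
  set col_K := (PySem.List.pyGet? K_cord 1).getD 0 with hcK
  set colQ  := (PySem.List.pyGet? Q_cord 1).getD 0 with hcQ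
  rw [vqA_loop_down row_K col_K colQ (row_Q - 1 - (-1)).toNat (row_Q - 1) (-1) (le_refl _) [],
      vqA_loop_up row_K col_K colQ (8 - (row_Q + 1)).toNat (row_Q + 1) 8 (le_refl _)]
  have hdown :
      (if colQ = col_K ∧ (-1 : Int) < row_K ∧ row_K ≤ row_Q - 1 then row_K else -1)
        = (if colQ = col_K ∧ row_K < row_Q then max 0 (row_K + 1) else 0) - 1 := by
    by_cases hc : colQ = col_K
    · simp only [hc, true_and]
      split_ifs <;> omega
    · rw [if_neg (fun hh => hc hh.1), if_neg (fun hh => hc hh.1)]; norm_num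
  have hup :
      (if colQ = col_K ∧ row_Q + 1 ≤ row_K ∧ row_K < 8 then row_K else 8)
        = (if colQ = col_K ∧ row_K > row_Q then min 7 (row_K - 1) else 7) + 1 := by
    by_cases hc : colQ = col_K
    · simp only [hc, true_and]
      split_ifs <;> omega
    · rw [if_neg (fun hh => hc hh.1), if_neg (fun hh => hc hh.1)]; norm_num
  rw [hdown, hup]
  simp
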